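-- pv_equiv track=rewrite | github.com/glen-w/TranscriptX | src/transcriptx/core/pipeline/manifest_builder.py | _infer_subview_and_slice
-- ===== SOURCE A (Python) =====
-- from typing import Any, Dict, Iterable, List, Optional
--
-- def _infer_subview_and_slice(parts: List[str]) -> tuple[Optional[str], Optional[str]]:
--     if not parts:
--         return None, None
--     for token in ("combined", "comparisons", "by_session", "by_speaker"):
--         if token in parts:
--             idx = parts.index(token)
--             slice_id = None
--             if token in {"by_session", "by_speaker"} and idx + 1 < len(parts):
--                 slice_id = parts[idx + 1]
--             return token, slice_id
--     return None, None
-- ===== SOURCE B (Python) =====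
-- from typing import List, Optional
--
-- _TOKENS = ("combined", "comparisons", "by_session", "by_speaker")
--
--
-- def _infer_subview_and_slice(parts: List[str]) -> tuple[Optional[str], Optional[str]]:
--     # Single pass over parts tracking the minimum-rank token seen so far
--     # (rank = position in _TOKENS), with an early break on rank 0.
--     best_rank, best_idx = 4, -1
--     for i, p in enumerate(parts):
--         try:
--             r = _TOKENS.index(p)
--         except ValueError:
--             continue
--         if r < best_rank:
--             best_rank, best_idx = r, i
--             if r == 0:
--                 break
--     if best_rank == 4:
--         return None, None
--     slice_id = parts[best_idx + 1] if best_rank >= 2 and best_idx + 1 < len(parts) else None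
--     return _TOKENS[best_rank], slice_id
-- ===== Notes on version B (the rewrite author's own statement) =====
-- stated objective: alternative
-- what changed: Replaces A's fixed cascade of per-token membership tests and list.index scans with a single minimum-tracking pass over parts: each element is mapped to a rank and the loop keeps the (rank, index) minimum with an early break at rank 0, selecting token and slice from that minimum afterwards.
import Mathlib
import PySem

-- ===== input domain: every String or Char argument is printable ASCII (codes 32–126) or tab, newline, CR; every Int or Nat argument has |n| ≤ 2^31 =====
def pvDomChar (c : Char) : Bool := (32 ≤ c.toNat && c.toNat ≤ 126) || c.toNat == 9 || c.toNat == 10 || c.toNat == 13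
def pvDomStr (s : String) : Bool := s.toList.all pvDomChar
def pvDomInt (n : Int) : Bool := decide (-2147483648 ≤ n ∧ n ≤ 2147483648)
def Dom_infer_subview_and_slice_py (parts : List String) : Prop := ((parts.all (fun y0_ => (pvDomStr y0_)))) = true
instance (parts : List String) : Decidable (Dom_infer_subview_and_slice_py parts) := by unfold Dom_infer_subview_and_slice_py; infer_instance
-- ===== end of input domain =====

-- B replaces A's cascade of membership tests and index scans with one minimum-tracking
-- pass over parts (rank of each element, keep the (rank, index) minimum, break at rank 0).

-- ===== PORT A =====
-- the loop 'for token in ("combined", "comparisons", "by_session", "by_speaker"):'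
def aTokenLoop (parts : List String) : List String → Option String × Option String
  | [] => (none, none)
  | tok :: rest =>
    if tok ∈ parts then
      match PySem.List.index? parts tok with
      | some idx =>
        -- slice_id = parts[idx+1] when token is by_session/by_speaker and idx+1 < len(parts)
        let slice_id : Option String :=
          if (tok = "by_session" ∨ tok = "by_speaker") ∧ idx + 1 < parts.length then
            PySem.List.pyGet? parts ((idx : Int) + 1)
          else none
        (some tok, slice_id)
      | none => (none, none)  -- unreachable: token is in parts
    else aTokenLoop parts rest

def infer_subview_and_slice_py (parts : List String) : Option String × Option String :=
  if parts = [] then (none, none)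
  else aTokenLoop parts ["combined", "comparisons", "by_session", "by_speaker"]

-- ===== PORT B =====
def bTokens : List String := ["combined", "comparisons", "by_session", "by_speaker"]

-- '_TOKENS.index(p)' under try/except ValueError
def bRankOf (p : String) : Option Nat := PySem.List.index? bTokens p

-- the 'for i, p in enumerate(parts)' loop with accumulator (best_rank, best_idx) and break
def bLoop : List (Int × String) → Nat × Int → Nat × Int
  | [], acc => acc
  | (i, p) :: rest, (br, bi) =>
    match bRankOf p with
    | none => bLoop rest (br, bi)                -- except ValueError: continue
    | some r =>
      if r < br then
        if r = 0 then (r, i)                     -- break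
        else bLoop rest (r, i)
      else bLoop rest (br, bi)

def infer_subview_and_slice_py_alt (parts : List String) : Option String × Option String :=
  let (br, bi) := bLoop (PySem.List.enumerate parts) (4, -1)
  if br = 4 then (none, none)
  else
    let slice_id : Option String :=
      if 2 ≤ br ∧ bi + 1 < (parts.length : Int) then PySem.List.pyGet? parts (bi + 1)
      else none
    (PySem.List.pyGet? bTokens (br : Int), slice_id)

-- ===== PRECONDITION & SPEC =====
def Spec_infer_subview_and_slice_py (parts : List String) (out : Option String × Option String) : Prop := out = infer_subview_and_slice_py_alt parts
instance (parts : List String) (out : Option String × Option String) : Decidable (Spec_infer_subview_and_slice_py parts out) := by unfold Spec_infer_subview_and_slice_py; infer_instance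

-- ===== CLAIM (what is proved, stated in full; the proofs are below) =====
def Claim_equal_infer_subview_and_slice_py : Prop := ∀ (parts : List String), Dom_infer_subview_and_slice_py parts → Spec_infer_subview_and_slice_py parts (infer_subview_and_slice_py parts)

-- ===== LEMMAS AND PROOFS =====

theorem bRankOf_some (p : String) (r : Nat) (h : bRankOf p = some r) :
    (p = "combined" ∧ r = 0) ∨ (p = "comparisons" ∧ r = 1) ∨
    (p = "by_session" ∧ r = 2) ∨ (p = "by_speaker" ∧ r = 3) := by
  unfold bRankOf bTokens at h
  by_cases h0 : p = "combined"
  · subst h0; rw [PySem.List.index?_cons_self] at h; exact Or.inl ⟨rfl, by injection h; omega⟩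
  rw [PySem.List.index?_cons_of_ne _ (fun he => h0 he.symm)] at h
  by_cases h1 : p = "comparisons"
  · subst h1; rw [PySem.List.index?_cons_self] at h
    simp at h; exact Or.inr (Or.inl ⟨rfl, by omega⟩)
  rw [PySem.List.index?_cons_of_ne _ (fun he => h1 he.symm)] at h
  by_cases h2 : p = "by_session"
  · subst h2; rw [PySem.List.index?_cons_self] at h
    simp at h; exact Or.inr (Or.inr (Or.inl ⟨rfl, by omega⟩))
  rw [PySem.List.index?_cons_of_ne _ (fun he => h2 he.symm)] at h
  by_cases h3 : p = "by_speaker"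
  · subst h3; rw [PySem.List.index?_cons_self] at h
    simp at h; exact Or.inr (Or.inr (Or.inr ⟨rfl, by omega⟩))
  rw [PySem.List.index?_cons_of_ne _ (fun he => h3 he.symm)] at h
  simp [PySem.List.index?] at h

theorem bRankOf_inj (x t : String) (r : Nat)
    (hx : bRankOf x = some r) (ht : bRankOf t = some r) : x = t := by
  rcases bRankOf_some x r hx with ⟨hp, hr⟩ | ⟨hp, hr⟩ | ⟨hp, hr⟩ | ⟨hp, hr⟩ <;>
    rcases bRankOf_some t r ht with ⟨hq, hs⟩ | ⟨hq, hs⟩ | ⟨hq, hs⟩ | ⟨hq, hs⟩ <;>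
    subst hp <;> subst hq <;> first | rfl | (exfalso; omega)

-- acc is stable while every remaining element's rank is ≥ the held rank
theorem bLoop_stable : ∀ (l : List String) (k bi : Int) (br : Nat),
    (∀ p ∈ l, ∀ r, bRankOf p = some r → br ≤ r) →
    bLoop (PySem.List.enumerate l k) (br, bi) = (br, bi) := by
  intro l
  induction l with
  | nil => intro k bi br _; rfl
  | cons x tl ih =>
    intro k bi br hall
    rw [PySem.List.enumerate_cons]
    cases hr : bRankOf x with
    | none =>
      simp only [bLoop, hr]
      exact ih (k + 1) bi br (fun p hp => hall p (List.mem_cons_of_mem _ hp))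
    | some r =>
      have hle : br ≤ r := hall x (List.mem_cons_self) r hr
      simp only [bLoop, hr]
      rw [if_neg (by omega)]
      exact ih (k + 1) bi br (fun p hp => hall p (List.mem_cons_of_mem _ hp))

-- first occurrence of the unique minimum-rank token wins the scan
theorem bLoop_descent (t : String) (rt : Nat) (hrt : bRankOf t = some rt) :
    ∀ (l : List String) (n : Nat) (k bi : Int) (br : Nat),
      PySem.List.index? l t = some n →
      rt < br →
      (∀ p ∈ l, ∀ r, bRankOf p = some r → rt ≤ r) →
      bLoop (PySem.List.enumerate l k) (br, bi) = (rt, k + n) := by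
  intro l
  induction l with
  | nil => intro n k bi br hn; rw [PySem.List.index?] at hn; simp at hn
  | cons x tl ih =>
    intro n k bi br hn hlt hall
    rw [PySem.List.enumerate_cons]
    have htl : ∀ p ∈ tl, ∀ r, bRankOf p = some r → rt ≤ r :=
      fun p hp => hall p (List.mem_cons_of_mem _ hp)
    by_cases hx : x = t
    · subst hx
      rw [PySem.List.index?_cons_self] at hn
      injection hn with hn; subst hn
      simp only [bLoop, hrt]
      rw [if_pos hlt]
      by_cases h0 : rt = 0
      · rw [if_pos h0]; simp
      · rw [if_neg h0, bLoop_stable tl (k + 1) k rt htl]; simp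
    · rw [PySem.List.index?_cons_of_ne (x := x) (v := t) tl hx] at hn
      cases hm : PySem.List.index? tl t with
      | none => rw [hm] at hn; simp at hn
      | some m =>
        rw [hm] at hn; simp at hn; subst hn
        cases hr : bRankOf x with
        | none =>
          simp only [bLoop, hr]
          rw [ih m (k + 1) bi br hm hlt htl]
          congr 1; push_cast; ring
        | some r =>
          have hge : rt ≤ r := hall x (List.mem_cons_self) r hr
          have hne : r ≠ rt := fun he => hx (bRankOf_inj x t rt (he ▸ hr) hrt)
          have hgt : rt < r := by omega
          simp only [bLoop, hr]
          by_cases hbr : r < br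
          · rw [if_pos hbr, if_neg (by omega), ih m (k + 1) k r hm hgt htl]
            congr 1; push_cast; ring
          · rw [if_neg hbr, ih m (k + 1) bi br hm hlt htl]
            congr 1; push_cast; ring

theorem notMem_of_rank_ge (parts : List String) (b : Nat)
    (h0 : 1 ≤ b → "combined" ∉ parts) (h1 : 2 ≤ b → "comparisons" ∉ parts)
    (h2 : 3 ≤ b → "by_session" ∉ parts) (h3 : 4 ≤ b → "by_speaker" ∉ parts) :
    ∀ p ∈ parts, ∀ r, bRankOf p = some r → b ≤ r := by
  intro p hp r hr
  rcases bRankOf_some p r hr with ⟨hq, hs⟩ | ⟨hq, hs⟩ | ⟨hq, hs⟩ | ⟨hq, hs⟩ <;> subst hq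
  · by_cases hb : b ≤ 0
    · omega
    · exact absurd hp (h0 (by omega))
  · by_cases hb : b ≤ 1
    · omega
    · exact absurd hp (h1 (by omega))
  · by_cases hb : b ≤ 2
    · omega
    · exact absurd hp (h2 (by omega))
  · by_cases hb : b ≤ 3
    · omega
    · exact absurd hp (h3 (by omega))

theorem index?_some_of_mem {α : Type} [BEq α] [LawfulBEq α] {xs : List α} {v : α}
    (h : v ∈ xs) : ∃ n, PySem.List.index? xs v = some n := by
  cases hi : PySem.List.index? xs v with
  | none => exact absurd ((PySem.List.index?_eq_none_iff xs v).mp hi) (by simp [h])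
  | some n => exact ⟨n, rfl⟩

-- ===== VERDICT (by name: the statement is the Claim_ definition above) =====
theorem infer_subview_and_slice_py_spec : Claim_equal_infer_subview_and_slice_py := by
  intro parts _
  unfold Spec_infer_subview_and_slice_py
  unfold infer_subview_and_slice_py infer_subview_and_slice_py_alt
  by_cases hnil : parts = []
  · subst hnil; decide
  rw [if_neg hnil]
  simp only [aTokenLoop]
  rw [show PySem.List.enumerate parts = PySem.List.enumerate parts 0 from rfl]
  have vac2 : ¬(2 ≤ 1) := by omega
  have vac3 : ¬(3 ≤ 2) := by omega
  have vac4 : ¬(4 ≤ 3) := by omega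
  by_cases m1 : "combined" ∈ parts
  · obtain ⟨n, hn⟩ := index?_some_of_mem m1
    rw [if_pos m1, hn,
      bLoop_descent "combined" 0 (by decide) parts n 0 (-1) 4 hn (by omega)
        (fun p _ r _ => Nat.zero_le r)]
    simp [bTokens, PySem.List.pyGet?, PySem.List.pyIdx?]
  · have hi1 : PySem.List.index? parts "combined" = none :=
      (PySem.List.index?_eq_none_iff parts _).mpr m1
    rw [if_neg m1]
    by_cases m2 : "comparisons" ∈ parts
    · obtain ⟨n, hn⟩ := index?_some_of_mem m2
      rw [if_pos m2, hn,
        bLoop_descent "comparisons" 1 (by decide) parts n 0 (-1) 4 hn (by omega)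
          (notMem_of_rank_ge parts 1 (fun _ => m1) (fun h => absurd h vac2)
            (fun h => absurd h (by omega)) (fun h => absurd h (by omega)))]
      simp [bTokens, PySem.List.pyGet?, PySem.List.pyIdx?]
    · rw [if_neg m2]
      by_cases m3 : "by_session" ∈ parts
      · obtain ⟨n, hn⟩ := index?_some_of_mem m3
        rw [if_pos m3, hn,
          bLoop_descent "by_session" 2 (by decide) parts n 0 (-1) 4 hn (by omega)
            (notMem_of_rank_ge parts 2 (fun _ => m1) (fun _ => m2)
              (fun h => absurd h vac3) (fun h => absurd h (by omega)))]
        have hnn : (0 : Int) ≤ (n : Int) + 1 := by positivity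
        by_cases h : n + 1 < parts.length
        · have h' : (n : Int) + 1 < (parts.length : Int) := by omega
          simp [bTokens, PySem.List.pyGet?, PySem.List.pyIdx?, h, h', hnn]
        · have h' : ¬((n : Int) + 1 < (parts.length : Int)) := by push_cast; omega
          simp [bTokens, PySem.List.pyGet?, PySem.List.pyIdx?, h, h']
      · rw [if_neg m3]
        by_cases m4 : "by_speaker" ∈ parts
        · obtain ⟨n, hn⟩ := index?_some_of_mem m4
          rw [if_pos m4, hn,
            bLoop_descent "by_speaker" 3 (by decide) parts n 0 (-1) 4 hn (by omega)
              (notMem_of_rank_ge parts 3 (fun _ => m1) (fun _ => m2) (fun _ => m3)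
                (fun h => absurd h vac4))]
          have hnn : (0 : Int) ≤ (n : Int) + 1 := by positivity
          by_cases h : n + 1 < parts.length
          · have h' : (n : Int) + 1 < (parts.length : Int) := by omega
            simp [bTokens, PySem.List.pyGet?, PySem.List.pyIdx?, h, h', hnn]
          · have h' : ¬((n : Int) + 1 < (parts.length : Int)) := by push_cast; omega
            simp [bTokens, PySem.List.pyGet?, PySem.List.pyIdx?, h, h']
        · rw [if_neg m4,
            bLoop_stable parts 0 (-1) 4
              (notMem_of_rank_ge parts 4 (fun _ => m1) (fun _ => m2) (fun _ => m3) (fun _ => m4))]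
          rfl
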